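-- pv_equiv track=rewrite | github.com/ahadaso042/CPS109Labs | labs109.py | count_troikas
-- ===== SOURCE A (Python) =====
-- from collections import defaultdict
-- from itertools import combinations
--
-- def count_troikas(items):
--     troika_count = 0
--     positions = defaultdict(list)
--
--     for idx, item in enumerate(items):
--         positions[item].append(idx)
--
--     for item, pos_list in positions.items():
--         for i, j in combinations(pos_list, 2):
--             k = j + (j - i)
--             if k < len(items) and items[k] == items[i]:
--                 troika_count += 1
--     return troika_count
-- ===== SOURCE B (Python) =====
-- def count_troikas(items):
--     n = len(items)
--     troika_count = 0
--     for j in range(n):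
--         d = 1
--         while j - d >= 0 and j + d < n:
--             if items[j - d] == items[j] and items[j] == items[j + d]:
--                 troika_count += 1
--             d += 1
--     return troika_count
-- ===== Notes on version B (the rewrite author's own statement) =====
-- stated objective: alternative
-- what changed: Replaces A's value-position index (defaultdict of position lists plus combinations of each list) by a direct center-expansion scan: for each center j it expands offsets d=1,2,... while both neighbours exist and counts triples with all three values equal.
import Mathlib
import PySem

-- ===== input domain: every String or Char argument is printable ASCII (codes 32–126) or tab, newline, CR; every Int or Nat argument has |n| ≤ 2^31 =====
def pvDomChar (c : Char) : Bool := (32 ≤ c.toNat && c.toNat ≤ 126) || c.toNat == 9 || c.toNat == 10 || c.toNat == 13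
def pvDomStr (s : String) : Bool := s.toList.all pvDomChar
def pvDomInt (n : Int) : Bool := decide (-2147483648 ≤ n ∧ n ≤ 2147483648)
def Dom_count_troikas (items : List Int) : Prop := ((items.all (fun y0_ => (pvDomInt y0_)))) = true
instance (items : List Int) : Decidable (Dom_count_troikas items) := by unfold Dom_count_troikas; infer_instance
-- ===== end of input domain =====

-- B replaces A's value→positions index (defaultdict + combinations per value) by a direct
-- center-expansion scan (for each center j, offsets d = 1, 2, … while both neighbours exist);
-- objective: alternative traversal of the same O(n^2) pair space.

-- ===== PORT A =====
-- A's inner loop body: 'for i, j in combinations(pos_list, 2): k = j+(j-i); if k < len(items) and items[k]==items[i]: count += 1'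
def pairStep (items : List Int) (acc : Int) (c : List Int) : Int :=
  match c with
  | [i, j] =>
    let k := j + (j - i)
    if k < (items.length : Int) ∧ PySem.List.pyGet? items k == PySem.List.pyGet? items i
    then acc + 1 else acc
  | _ => acc

def count_troikas (items : List Int) : Int :=
  let positions : PySem.Dict Int (List Int) :=
    (PySem.List.enumerate items).foldl
      (fun d p => d.modify p.2 [] (fun l => l ++ [p.1])) PySem.Dict.empty
  positions.items.foldl
    (fun acc p => (PySem.List.combinations p.2 2).foldl (pairStep items) acc) 0

-- ===== PORT B =====
-- B's while loop: 'while j - d >= 0 and j + d < n: if items[j-d]==items[j] and items[j]==items[j+d]: count += 1; d += 1'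
def bInner (items : List Int) (n j d acc : Int) : Int :=
  if h : 0 ≤ j - d ∧ j + d < n then
    bInner items n j (d + 1)
      (if PySem.List.pyGet? items (j - d) == PySem.List.pyGet? items j
          && PySem.List.pyGet? items j == PySem.List.pyGet? items (j + d)
       then acc + 1 else acc)
  else acc
termination_by (n - (j + d)).toNat
decreasing_by omega

def count_troikas_alt (items : List Int) : Int :=
  let n : Int := items.length
  (PySem.List.pyRange 0 n).foldl (fun acc j => bInner items n j 1 acc) 0

-- ===== PRECONDITION & SPEC =====
def Spec_count_troikas (items : List Int) (out : Int) : Prop := out = count_troikas_alt items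
instance (items : List Int) (out : Int) : Decidable (Spec_count_troikas items out) := by unfold Spec_count_troikas; infer_instance

-- ===== CLAIM (what is proved, stated in full; the proofs are below) =====
def Claim_equal_count_troikas : Prop := ∀ (items : List Int), Dom_count_troikas items → Spec_count_troikas items (count_troikas items)

-- ===== LEMMAS AND PROOFS =====

-- value at a (Nat) index
def fI (items : List Int) (t : Nat) : Int := items.getD t 0

-- the common reference predicate on an index pair (i, j), i < j < n:
-- all three of items[i], items[j], items[2j-i] exist and are equal
-- the existence-and-match test on k = 2j - i and value match with i
def SAn (items : List Int) (q : Nat × Nat) : Bool :=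
  decide (2 * q.2 - q.1 < items.length) && (fI items (2 * q.2 - q.1) == fI items q.1)

def Qb2 (items : List Int) (i j : Nat) : Bool :=
  (fI items i == fI items j) && SAn items (i, j)

-- all ordered pairs (earlier, later) of a list
def pairsOf {α : Type} : List α → List (α × α)
  | [] => []
  | x :: xs => xs.map (fun y => (x, y)) ++ pairsOf xs

-- B's per-center test at center j, offset d
def goodB (items : List Int) (j d : Nat) : Bool :=
  (fI items (j - d) == fI items j) && (fI items j == fI items (j + d))

-- A's inner-loop test on a combinations element
def RlA (items : List Int) (c : List Int) : Bool :=
  match c with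
  | [i, j] =>
    decide (j + (j - i) < (items.length : Int)) &&
      (PySem.List.pyGet? items (j + (j - i)) == PySem.List.pyGet? items i)
  | _ => false

lemma pairStep_eq (items : List Int) (acc : Int) (c : List Int) :
    pairStep items acc c = if RlA items c then acc + 1 else acc := by
  match c with
  | [] => rfl
  | [_] => rfl
  | [i, j] =>
    simp only [pairStep, RlA, Bool.and_eq_true, decide_eq_true_eq]
  | _ :: _ :: _ :: _ => rfl

lemma foldl_pairStep (items : List Int) (L : List (List Int)) :
    ∀ acc : Int, L.foldl (pairStep items) acc = acc + (L.countP (RlA items) : Int) := by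
  induction L with
  | nil => simp
  | cons c L ih =>
    intro acc
    rw [List.foldl_cons, ih, pairStep_eq, List.countP_cons]
    split_ifs <;> push_cast <;> ring

lemma comb2_eq {α : Type} (l : List α) :
    PySem.List.combinations l 2 = (pairsOf l).map (fun p => [p.1, p.2]) := by
  induction l with
  | nil => simp [PySem.List.combinations_nil_succ, pairsOf]
  | cons x xs ih =>
    rw [PySem.List.combinations_cons_succ, PySem.List.combinations_one, ih]
    simp [pairsOf, List.map_map, Function.comp]

lemma pairsOf_map {α β : Type} (g : α → β) (l : List α) :
    pairsOf (l.map g) = (pairsOf l).map (fun p => (g p.1, g p.2)) := by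
  induction l with
  | nil => rfl
  | cons x xs ih => simp [pairsOf, List.map_map, ih, Function.comp]

lemma pairsOf_filter {α : Type} (p : α → Bool) (l : List α) :
    pairsOf (l.filter p) = (pairsOf l).filter (fun q => p q.1 && p q.2) := by
  induction l with
  | nil => rfl
  | cons x xs ih =>
    cases hx : p x <;>
      simp [pairsOf, hx, ih, List.filter_map, Function.comp_def]

lemma mem_pairsOf_append_singleton {α : Type} (l : List α) (a : α) (q : α × α) :
    q ∈ pairsOf (l ++ [a]) ↔ q ∈ pairsOf l ∨ q ∈ l.map (fun x => (x, a)) := by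
  induction l with
  | nil => simp [pairsOf]
  | cons x xs ih =>
    simp only [List.cons_append, pairsOf, List.mem_append, ih, List.map_append,
      List.map_cons, List.mem_cons]
    tauto

lemma mem_pairsOf_range {n : Nat} {q : Nat × Nat} (h : q ∈ pairsOf (List.range n)) :
    q.1 < q.2 ∧ q.2 < n := by
  induction n with
  | zero => simp [pairsOf] at h
  | succ n ih =>
    rw [List.range_succ, mem_pairsOf_append_singleton] at h
    rcases h with h | h
    · have := ih h; omega
    · simp only [List.mem_map, List.mem_range] at h
      obtain ⟨x, hx, rfl⟩ := h
      simp; omega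

lemma countP_pairsOf_append_singleton {α : Type} (p : α × α → Bool) (l : List α) (a : α) :
    (pairsOf (l ++ [a])).countP p = (pairsOf l).countP p + (l.map (fun x => (x, a))).countP p := by
  induction l with
  | nil => simp [pairsOf]
  | cons x xs ih =>
    simp only [List.cons_append, pairsOf, List.countP_append, ih, List.map_append,
      List.map_cons, List.map_nil, List.countP_cons, List.countP_nil]
    omega

-- single group-membership indicator collapses over a nodup list of values
lemma sum_single {V : List Int} (hnd : V.Nodup) (c d : Int) (b : Bool) (hc : c ∈ V) :
    (V.map (fun v => if (c == v) && ((d == v) && b) then (1 : Int) else 0)).sum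
      = if (c == d) && b then 1 else 0 := by
  induction V with
  | nil => cases hc
  | cons w V ih =>
    rcases List.nodup_cons.mp hnd with ⟨hw, hnd'⟩
    by_cases hcw : c = w
    · subst hcw
      have hz : ((V.map (fun v => if (c == v) && ((d == v) && b) then (1 : Int) else 0)).sum = 0) := by
        apply List.sum_eq_zero
        intro x hx
        simp only [List.mem_map] at hx
        obtain ⟨v, hv, rfl⟩ := hx
        have : ¬ (c = v) := fun h => hw (h ▸ hv)
        simp [beq_iff_eq, this]
      simp only [List.map_cons, List.sum_cons, hz, add_zero]
      by_cases hdc : d = c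
      · subst hdc; simp
      · simp [beq_iff_eq, hdc, show ¬ c = d from fun h => hdc h.symm]
    · have hc' : c ∈ V := by
        rcases List.mem_cons.mp hc with h | h
        · exact absurd h hcw
        · exact h
      simp only [List.map_cons, List.sum_cons, ih hnd' hc']
      simp [beq_iff_eq, hcw]

-- summing per-value pair counts over the distinct values recovers the ungrouped count
lemma group_sum (items : List Int) (S : Nat × Nat → Bool) (L : List (Nat × Nat)) (V : List Int)
    (hnd : V.Nodup) (hmem : ∀ q ∈ L, fI items q.1 ∈ V) :
    (V.map (fun v =>
        ((L.countP (fun q => (fI items q.1 == v) && ((fI items q.2 == v) && S q))) : Int))).sum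
      = (L.countP (fun q => (fI items q.1 == fI items q.2) && S q) : Int) := by
  induction L with
  | nil => simp
  | cons q L ih =>
    have hq : fI items q.1 ∈ V := hmem q List.mem_cons_self
    simp only [List.countP_cons]
    have hcast : ∀ v ∈ V,
        ((L.countP (fun q' => (fI items q'.1 == v) && ((fI items q'.2 == v) && S q')) +
            if (fI items q.1 == v) && ((fI items q.2 == v) && S q) then 1 else 0 : Nat) : Int)
          = ((L.countP (fun q' => (fI items q'.1 == v) && ((fI items q'.2 == v) && S q')) : Nat) : Int)
            + (if (fI items q.1 == v) && ((fI items q.2 == v) && S q) then (1 : Int) else 0) := by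
      intro v _
      split_ifs <;> push_cast <;> ring
    rw [List.map_congr_left hcast, PySem.List.sum_map_add_int,
      ih (fun q' hq' => hmem q' (List.mem_cons_of_mem _ hq')),
      sum_single hnd (fI items q.1) (fI items q.2) (S q) hq]
    split_ifs <;> push_cast <;> ring

-- grouping the pair count by the second component (the center)
lemma countP_pairsOf_range (S : Nat × Nat → Bool) (n : Nat) :
    (pairsOf (List.range n)).countP S
      = ((List.range n).map (fun j => (List.range j).countP (fun i => S (i, j)))).sum := by
  induction n with
  | zero => simp [pairsOf]
  | succ n ih =>
    rw [List.range_succ, countP_pairsOf_append_singleton, ih, List.map_append]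
    simp [List.countP_map, Function.comp_def]

lemma A_eq (items : List Int) :
    count_troikas items
      = ((pairsOf (List.range items.length)).countP (fun q => Qb2 items q.1 q.2) : Int) := by
  have hE : (PySem.List.enumerate items).map Prod.swap
      = (List.range items.length).map (fun (k : Nat) => (PySem.List.pyGetD items (↑k) 0, (k : Int))) := by
    rw [PySem.List.enumerate_eq_map_pyRange items 0]
    rw [show PySem.List.len items = ((items.length : Nat) : Int) from rfl,
      PySem.List.pyRange_zero_natCast, List.map_map, List.map_map]
    rfl
  simp only [count_troikas]
  rw [show (PySem.List.enumerate items).foldl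
        (fun d p => d.modify p.2 [] (fun l => l ++ [p.1])) PySem.Dict.empty
      = ((PySem.List.enumerate items).map Prod.swap).foldl
        (fun d p => d.modify p.1 [] (fun l => l ++ [p.2])) PySem.Dict.empty
    from (List.foldl_map (f := Prod.swap) (g := fun (d : PySem.Dict Int (List Int)) p => d.modify p.1 [] (fun l => l ++ [p.2]))).symm]
  set D := ((PySem.List.enumerate items).map Prod.swap).foldl
      (fun d p => d.modify p.1 [] (fun l => l ++ [p.2])) PySem.Dict.empty with hD
  have hkeys : D.keys = PySem.Set.ofList items := by
    have h1 := PySem.Dict.keys_foldl_modify_key ((PySem.List.enumerate items).map Prod.swap)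
      (fun p => p.1) ([] : List Int) (fun _ p l => l ++ [p.2]) PySem.Dict.empty
    rw [PySem.Dict.keys_empty] at h1
    rw [hD]
    refine h1.trans ?_
    rw [show PySem.Set.update ([] : List Int) (((PySem.List.enumerate items).map Prod.swap).map (fun p => p.1))
        = PySem.Set.ofList (((PySem.List.enumerate items).map Prod.swap).map (fun p => p.1))
      from PySem.Set.update_empty _]
    congr 1
    rw [hE, List.map_map]
    have hcg : (List.range items.length).map
          ((fun (p : Int × Int) => p.1) ∘ fun (k : Nat) => (PySem.List.pyGetD items (↑k) 0, (k : Int)))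
        = (List.range items.length).map (fun (k : Nat) => items.getD k 0) :=
      List.map_congr_left (fun k _ => PySem.List.pyGetD_natCast items k 0)
    rw [hcg]
    apply List.ext_getElem
    · simp
    · intro i h1 h2
      simp [List.getElem?_eq_getElem h2]
  have hnodup : D.keys.Nodup := by rw [hkeys]; exact PySem.Set.nodup_ofList items
  have hget : ∀ v : Int, D.getD v []
      = ((List.range items.length).filter (fun k => items.getD k 0 == v)).map (fun k => ((k : Nat) : Int)) := by
    intro v
    rw [hD, PySem.Dict.getD_foldl_modify_append ((PySem.List.enumerate items).map Prod.swap)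
        PySem.Dict.empty v,
      PySem.Dict.getD_empty, List.nil_append, hE, List.filter_map, List.map_map]
    simp only [Function.comp_def, PySem.List.pyGetD_natCast]
  rw [PySem.Dict.items_eq_map_keys D hnodup [], hkeys, List.foldl_map]
  rw [PySem.List.foldl_congr_mem _ _
    (fun acc v => acc + (((pairsOf (List.range items.length)).countP
        (fun q => (fI items q.1 == v) && ((fI items q.2 == v) && SAn items q)) : Nat) : Int)) _ ?_]
  · rw [PySem.List.foldl_add, zero_add,
      group_sum items (SAn items) (pairsOf (List.range items.length)) (PySem.Set.ofList items)
        (PySem.Set.nodup_ofList items) ?memb]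
    · apply congrArg
      apply List.countP_congr
      intro q hq
      simp [Qb2]
    · intro q hq
      rw [PySem.Set.mem_ofList]
      have hb := mem_pairsOf_range hq
      have h1 : q.1 < items.length := by omega
      rw [fI, List.getD_eq_getElem _ _ h1]
      exact List.getElem_mem h1
  · intro acc v hv
    rw [foldl_pairStep, hget v, comb2_eq, List.countP_map, pairsOf_map, List.countP_map,
      pairsOf_filter, List.countP_filter]
    refine congrArg (fun z : Int => acc + z) ?_
    refine congrArg Nat.cast (List.countP_congr (fun q hq => ?_))
    have hb := mem_pairsOf_range hq
    have h1 : q.1 < items.length := by omega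
    have h2 : q.2 < items.length := hb.2
    simp only [Function.comp_apply, RlA]
    have hk : ((q.2 : Int) + ((q.2 : Int) - (q.1 : Int))) = ((2 * q.2 - q.1 : Nat) : Int) := by omega
    rw [hk]
    simp only [PySem.List.pyGet?_natCast]
    by_cases hklen : 2 * q.2 - q.1 < items.length
    · rw [List.getElem?_eq_getElem hklen, List.getElem?_eq_getElem h1]
      simp only [SAn, fI, Bool.and_eq_true, decide_eq_true_eq, beq_iff_eq, Option.some.injEq,
        List.getD_eq_getElem _ _ h1, List.getD_eq_getElem _ _ h2, List.getD_eq_getElem _ _ hklen,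
        Nat.cast_lt]
      constructor
      · rintro ⟨⟨hlt, hv1⟩, hv2, hv3⟩
        exact ⟨hv2, hv3, hlt, hv1⟩
      · rintro ⟨hv2, hv3, hlt, hv1⟩
        exact ⟨⟨hlt, hv1⟩, hv2, hv3⟩
    · simp [SAn, hklen, Nat.cast_lt]

lemma bInner_spec (items : List Int) (jN : Nat) (hj : jN < items.length) :
    ∀ (fuel dN : Nat), fuel = min jN (items.length - 1 - jN) + 1 - dN → 1 ≤ dN →
      ∀ acc : Int, bInner items (items.length : Int) (jN : Int) (dN : Int) acc
        = acc + ((List.range' dN fuel).countP (goodB items jN) : Int) := by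
  intro fuel
  induction fuel with
  | zero =>
    intro dN hfe hd acc
    rw [bInner, dif_neg (by omega)]
    simp
  | succ fuel ih =>
    intro dN hfe hd acc
    have hcond : (0 ≤ (jN : Int) - (dN : Int) ∧ (jN : Int) + (dN : Int) < ((items.length : Nat) : Int)) := by
      omega
    rw [bInner, dif_pos hcond]
    have hdn : ((dN : Int) + 1) = (((dN + 1 : Nat) : Nat) : Int) := by push_cast; ring
    rw [hdn, ih (dN + 1) (by omega) (by omega)]
    have hga : (jN : Int) - (dN : Int) = ((jN - dN : Nat) : Int) := by omega
    have hgb : (jN : Int) + (dN : Int) = ((jN + dN : Nat) : Int) := by omega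
    have h1 : jN - dN < items.length := by omega
    have h2 : jN < items.length := hj
    have h3 : jN + dN < items.length := by omega
    rw [hga, hgb]
    simp only [PySem.List.pyGet?_natCast,
      List.getElem?_eq_getElem h1, List.getElem?_eq_getElem h2, List.getElem?_eq_getElem h3]
    rw [List.range'_succ, List.countP_cons]
    have hgood : goodB items jN dN
        = ((items[jN - dN] == items[jN]) && (items[jN] == items[jN + dN])) := by
      simp [goodB, fI, h1, h2, h3]
    rw [show ((some items[jN - dN] == some items[jN]) && (some items[jN] == some items[jN + dN]))
        = goodB items jN dN from by rw [hgood]; simp]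
    split_ifs <;> push_cast <;> ring

lemma countP_range_sum (p : Nat → Bool) (n : Nat) :
    ((List.range n).countP p : Nat) = ∑ i ∈ Finset.range n, if p i then 1 else 0 := by
  induction n with
  | zero => simp
  | succ n ih =>
    rw [List.range_succ, List.countP_append, ih, Finset.sum_range_succ]
    simp [List.countP_cons]

-- per-center reindexing i ↦ d = j - i between A's pair view and B's offset view
lemma center_eq (items : List Int) (j : Nat) (hj : j < items.length) :
    (List.range j).countP (fun i => Qb2 items i j)
      = (List.range' 1 (min j (items.length - 1 - j))).countP (goodB items j) := by
  have hm := countP_range_sum (fun i => Qb2 items i j) j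
  rw [List.range'_eq_map_range, List.countP_map]
  have hm2 := countP_range_sum ((goodB items j) ∘ (fun d' => 1 + d')) (min j (items.length - 1 - j))
  rw [hm, hm2, ← Finset.card_filter, ← Finset.card_filter]
  apply Finset.card_bij (fun i _ => j - i - 1)
  · intro i hi
    simp only [Finset.mem_filter, Finset.mem_range, Qb2, SAn, fI, Function.comp_apply, goodB,
      Bool.and_eq_true, decide_eq_true_eq, beq_iff_eq] at hi ⊢
    obtain ⟨hij, hfij, hklen, hfki⟩ := hi
    have e1 : 1 + (j - i - 1) = j - i := by omega
    have e2 : j - (j - i) = i := by omega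
    have e3 : j + (j - i) = 2 * j - i := by omega
    refine ⟨by omega, ?_⟩
    rw [e1, e2, e3]
    exact ⟨hfij, hfij ▸ hfki.symm⟩
  · intro a ha b hb hab
    simp only [Finset.mem_filter, Finset.mem_range] at ha hb
    omega
  · intro d' hd'
    simp only [Finset.mem_filter, Finset.mem_range, Function.comp_apply, goodB, fI,
      Bool.and_eq_true, beq_iff_eq] at hd'
    obtain ⟨hdm, hg1, hg2⟩ := hd'
    refine ⟨j - 1 - d', ?_, by omega⟩
    simp only [Finset.mem_filter, Finset.mem_range, Qb2, SAn, fI,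
      Bool.and_eq_true, decide_eq_true_eq, beq_iff_eq]
    have e1 : j - (1 + d') = j - 1 - d' := by omega
    have e2 : 2 * j - (j - 1 - d') = j + (1 + d') := by omega
    rw [e1] at hg1
    refine ⟨by omega, hg1, by rw [e2]; omega, ?_⟩
    rw [e2, ← hg2, hg1]

lemma B_eq (items : List Int) :
    count_troikas_alt items
      = ((pairsOf (List.range items.length)).countP (fun q => Qb2 items q.1 q.2) : Int) := by
  simp only [count_troikas_alt]
  rw [PySem.List.pyRange_zero_natCast, List.foldl_map]
  rw [PySem.List.foldl_congr_mem _ _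
    (fun acc jN => acc + (((List.range' 1 (min jN (items.length - 1 - jN))).countP (goodB items jN) : Nat) : Int)) _ ?_]
  · rw [PySem.List.foldl_add, zero_add, countP_pairsOf_range, Nat.cast_list_sum, List.map_map]
    apply congrArg
    apply List.map_congr_left
    intro jN hjN
    simp only [Function.comp_apply]
    rw [center_eq items jN (List.mem_range.mp hjN)]
  · intro acc jN hjN
    exact bInner_spec items jN (List.mem_range.mp hjN)
      (min jN (items.length - 1 - jN)) 1 (by omega) (by omega) acc

-- ===== VERDICT (by name: the statement is the Claim_ definition above) =====
theorem count_troikas_spec : Claim_equal_count_troikas := by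
  intro items _
  unfold Spec_count_troikas
  rw [A_eq, B_eq]
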